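-- pv_equiv track=rewrite | github.com/ttoino/advent-of-code-2018 | day08/part2.py | parse
-- ===== SOURCE A (Python) =====
-- from collections import Counter, defaultdict
--
-- def parse(l: list[int]) -> tuple[list[int], int]:
--     children_count, entries, *l = l
--
--     children = defaultdict(lambda: 0)
--     for i in range(children_count):
--         l, s = parse(l)
--         children[i + 1] = s
--
--     return l[entries:], sum(l[:entries]) if children_count == 0 else sum(
--         children[i] for i in l[:entries])
-- ===== SOURCE B (Python) =====
-- def parse(l: list[int]) -> tuple[list[int], int]:
--     i = 0
--     stack = []
--     while True:
--         if stack and stack[-1][0] <= len(stack[-1][2]):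
--             c, e, vals = stack.pop()
--             tail = l[i:]
--             meta, rest = tail[:e], tail[e:]
--             i = len(l) - len(rest)
--             v = sum(meta) if c == 0 else sum(
--                 vals[m - 1] if 1 <= m <= len(vals) else 0 for m in meta)
--             if stack:
--                 stack[-1][2].append(v)
--             else:
--                 return rest, v
--         else:
--             c, e = l[i], l[i + 1]
--             i += 2
--             stack.append([c, e, []])
-- ===== Notes on version B (the rewrite author's own statement) =====
-- stated objective: alternative
-- what changed: Replaces A's recursive descent (re-recursing on the remaining list and a per-node defaultdict of child values) with a single iterative loop keeping an index into the list and an explicit stack of partially-built frames (declared child count, metadata count, child values).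
import Mathlib
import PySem

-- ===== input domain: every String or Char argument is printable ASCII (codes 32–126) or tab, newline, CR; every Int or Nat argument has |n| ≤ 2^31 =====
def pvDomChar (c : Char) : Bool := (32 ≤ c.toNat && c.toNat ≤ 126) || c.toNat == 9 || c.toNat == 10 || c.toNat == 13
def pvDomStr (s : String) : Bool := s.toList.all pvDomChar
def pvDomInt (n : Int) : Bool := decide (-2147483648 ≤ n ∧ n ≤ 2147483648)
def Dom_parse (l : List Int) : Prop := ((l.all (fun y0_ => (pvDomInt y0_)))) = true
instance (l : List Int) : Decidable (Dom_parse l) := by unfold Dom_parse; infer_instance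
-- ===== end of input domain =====

-- B replaces A's recursive descent (re-recursing on the remaining list, child values in a
-- per-node defaultdict) with one iterative pass: an index into the list and an explicit stack
-- of partially-built frames (declared child count, metadata count, child values). Same cost.

-- ===== PORT A =====
def parseAux : Nat → List Int → List Int × Int
  | 0, _ => ([], 0)
  | f + 1, l =>
    match l with
    | c :: e :: rest =>
      let st := (PySem.List.pyRange 0 c 1).foldl
        (fun (st : List Int × PySem.Dict Int Int) (i : Int) =>
          ((parseAux f st.1).1, st.2.insert (i + 1) (parseAux f st.1).2))
        (rest, PySem.Dict.empty)
      (PySem.List.slice st.1 (some e) none,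
       if c = 0 then (PySem.List.slice st.1 none (some e)).sum
       else (PySem.List.slice st.1 none (some e)).foldl (fun acc m => acc + st.2.getD m 0) 0)
    | _ => ([], 0)

def parse (l : List Int) : List Int × Int := parseAux (l.length + 1) l

-- ===== PORT B =====
structure PFrame where
  cnt : Int
  ent : Int
  vals : List Int
deriving Repr, DecidableEq

def stepB (l : List Int) : Nat → Int → List PFrame → List Int × Int
  | 0, _, _ => ([], 0)
  | f + 1, i, stack =>
    match stack with
    | top :: rest =>
      if top.cnt ≤ (top.vals.length : Int) then
        let tail := PySem.List.slice l (some i) none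
        let md := PySem.List.slice tail none (some top.ent)
        let rest_ := PySem.List.slice tail (some top.ent) none
        let i' := (l.length : Int) - (rest_.length : Int)
        let v := if top.cnt = 0 then md.sum
          else md.foldl (fun acc m =>
            acc + (if 1 ≤ m ∧ m ≤ (top.vals.length : Int)
              then top.vals.getD (m - 1).toNat 0 else 0)) 0
        match rest with
        | fr :: rest' => stepB l f i' (⟨fr.cnt, fr.ent, fr.vals ++ [v]⟩ :: rest')
        | [] => (rest_, v)
      else
        match PySem.List.pyGet? l i, PySem.List.pyGet? l (i + 1) with
        | some c2, some e2 => stepB l f (i + 2) (⟨c2, e2, []⟩ :: top :: rest)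
        | _, _ => ([], 0)
    | [] =>
      match PySem.List.pyGet? l i, PySem.List.pyGet? l (i + 1) with
      | some c2, some e2 => stepB l f (i + 2) [⟨c2, e2, []⟩]
      | _, _ => ([], 0)

def parse_alt (l : List Int) : List Int × Int := stepB l (l.length + 2) 0 []

-- ===== PRECONDITION & SPEC =====
-- Shape checker behind Pre_parse: it walks the input's HEADER structure only (are there two
-- elements left for every header read?), tracking positions with Python's slice-clamp rule;
-- it computes no node values. A raises (ValueError on unpacking a too-short node) exactly
-- where this check fails; Pre_parse excludes precisely those inputs.
def iterChk (step : Nat → Option Nat) : Nat → Nat → Option Nat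
  | i, 0 => some i
  | i, n + 1 => (step i).bind (fun j => iterChk step j n)

def chk (l : List Int) : Nat → Nat → Option Nat
  | 0, _ => none
  | f + 1, i =>
    match l[i]?, l[i + 1]? with
    | some c, some e =>
        (iterChk (chk l f) (i + 2) c.toNat).map
          (fun j => j + PySem.List.clampIdx (l.length - j) e)
    | _, _ => none

def Pre_parse (l : List Int) : Prop := (chk l (l.length + 1) 0).isSome = true
instance (l : List Int) : Decidable (Pre_parse l) := by unfold Pre_parse; infer_instance

def pvWitness_parse : List Int := [2, 3, 0, 3, 10, 11, 12, 1, 1, 0, 1, 99, 2, 1, 1, 2]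

def Spec_parse (l : List Int) (out : List Int × Int) : Prop := out = parse_alt l
instance (l : List Int) (out : List Int × Int) : Decidable (Spec_parse l out) := by unfold Spec_parse; infer_instance

-- ===== CLAIM (what is proved, stated in full; the proofs are below) =====
def Claim_equal_parse : Prop := ∀ (l : List Int), Dom_parse l → Pre_parse l → Spec_parse l (parse l)

-- ===== LEMMAS AND PROOFS =====

def insSeq (d : PySem.Dict Int Int) (a : Int) : List Int → PySem.Dict Int Int
  | [] => d
  | v :: vs => insSeq (d.insert (a + 1) v) (a + 1) vs

theorem insSeq_getD (vs : List Int) (d : PySem.Dict Int Int) (a m : Int) :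
    (insSeq d a vs).getD m 0 =
      if a + 1 ≤ m ∧ m ≤ a + vs.length then vs.getD (m - a - 1).toNat 0 else d.getD m 0 := by
  induction vs generalizing d a with
  | nil =>
      simp only [insSeq, List.length_nil, Nat.cast_zero, add_zero]
      rw [if_neg (by omega)]
  | cons v vs ih =>
      simp only [insSeq, ih, PySem.Dict.getD_insert, List.length_cons]
      by_cases h1 : m = a + 1
      · subst h1
        rw [if_neg (by omega), if_pos (by omega)]
        simp
      · by_cases h2 : a + 2 ≤ m ∧ m ≤ a + 1 + (vs.length : Int)
        · rw [if_pos (by omega)]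
          have : (m - a - 1).toNat = (m - (a+1) - 1).toNat + 1 := by omega
          rw [this, List.getD_cons_succ,
            if_pos (show _ ∧ _ from ⟨by omega, by omega⟩)]
        · rw [if_neg h1, if_neg (show ¬(a + 1 ≤ m ∧ m ≤ a + ((vs.length + 1 : Nat) : Int)) by
            intro hc; push_cast at hc h2; omega), if_neg (by omega)]

theorem val_eq (c : Int) (vs : List Int) (md : List Int) :
    (if c = 0 then md.sum
      else md.foldl (fun acc m =>
        acc + (if 1 ≤ m ∧ m ≤ (vs.length : Int) then vs.getD (m - 1).toNat 0 else 0)) 0)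
    = (if c = 0 then md.sum
       else md.foldl (fun acc m => acc + (insSeq PySem.Dict.empty 0 vs).getD m 0) 0) := by
  by_cases h0 : c = 0
  · simp [h0]
  · rw [if_neg h0, if_neg h0]
    apply PySem.List.foldl_congr_mem
    intro acc m _
    rw [insSeq_getD]
    simp only [PySem.Dict.getD_empty, zero_add]
    norm_num

theorem slice_to_clamp {α : Type} (xs : List α) (b : Int) :
    PySem.List.slice xs none (some b) = xs.take (PySem.List.clampIdx xs.length b) := by
  simp [PySem.List.slice]

theorem idxs_succ (n : Nat) (a : Int) :
    (List.range (n + 1)).map (fun t : Nat => a + (t : Int)) =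
      a :: (List.range n).map (fun t : Nat => (a + 1) + (t : Int)) := by
  rw [List.range_succ_eq_map, List.map_cons, List.map_map]
  refine congrArg₂ _ (by simp) ?_
  apply List.map_congr_left
  intro t _
  simp only [Function.comp_apply, Nat.succ_eq_add_one]
  push_cast
  ring

theorem main_lemma (f : Nat) (l : List Int) :
    (∀ i j : Nat, chk l f i = some j →
      j ≤ l.length ∧
      ∃ v : Int,
        (∀ g, f ≤ g → parseAux g (l.drop i) = (l.drop j, v)) ∧
        ∃ k : Nat, k + min i l.length ≤ min j l.length ∧
          ∀ (g : Nat) (top : PFrame) (rest : List PFrame),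
            ¬(top.cnt ≤ (top.vals.length : Int)) →
            stepB l (g + k) (i : Int) (top :: rest)
              = stepB l g (j : Int) (⟨top.cnt, top.ent, top.vals ++ [v]⟩ :: rest))
    ∧
    (∀ i n j : Nat, iterChk (chk l f) i n = some j →
      (i ≤ l.length → j ≤ l.length) ∧
      ∃ vs : List Int, vs.length = n ∧
        (∀ g, f ≤ g → ∀ (d : PySem.Dict Int Int) (a : Int),
          ((List.range n).map (fun t : Nat => a + (t : Int))).foldl
            (fun (st : List Int × PySem.Dict Int Int) (i : Int) =>
              ((parseAux g st.1).1, st.2.insert (i + 1) (parseAux g st.1).2)) (l.drop i, d)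
            = (l.drop j, insSeq d a vs)) ∧
        ∃ k : Nat, k + min i l.length ≤ min j l.length ∧
          ∀ (g : Nat) (ent : Int) (vals : List Int) (rest : List PFrame),
            stepB l (g + k) (i : Int) (⟨((vals.length + n : Nat) : Int), ent, vals⟩ :: rest)
              = stepB l g (j : Int)
                  (⟨((vals.length + n : Nat) : Int), ent, vals ++ vs⟩ :: rest)) := by
  induction f with
  | zero =>
      constructor
      · intro i j h; simp [chk] at h
      · intro i n j h
        cases n with
        | zero =>
            simp only [iterChk, Option.some.injEq] at h
            subst h
            exact ⟨fun h => h, [], rfl, by intro g _ d a; simp [insSeq], 0, by omega,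
              by intro g ent vals rest; simp⟩
        | succ n => simp [iterChk, chk] at h
  | succ f ih =>
      have chkS : ∀ i j : Nat, chk l (f + 1) i = some j →
          j ≤ l.length ∧
          ∃ v : Int,
            (∀ g, f + 1 ≤ g → parseAux g (l.drop i) = (l.drop j, v)) ∧
            ∃ k : Nat, k + min i l.length ≤ min j l.length ∧
              ∀ (g : Nat) (top : PFrame) (rest : List PFrame),
                ¬(top.cnt ≤ (top.vals.length : Int)) →
                stepB l (g + k) (i : Int) (top :: rest)
                  = stepB l g (j : Int) (⟨top.cnt, top.ent, top.vals ++ [v]⟩ :: rest) := by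
        intro i j h
        simp only [chk] at h
        split at h
        case _ c e hgi hgi1 =>
          rw [Option.map_eq_some_iff] at h
          obtain ⟨j₂, hN, hj⟩ := h
          obtain ⟨hj2le', vs, hlen, hfold, kN, hkN, hmach⟩ := ih.2 (i + 2) c.toNat j₂ hN
          obtain ⟨hi, hci⟩ := List.getElem?_eq_some_iff.mp hgi
          obtain ⟨hi1, hei⟩ := List.getElem?_eq_some_iff.mp hgi1
          have hj2le : j₂ ≤ l.length := hj2le' (by omega)
          have hsle : PySem.List.clampIdx (l.length - j₂) e ≤ l.length - j₂ :=
            PySem.List.clampIdx_le _ _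
          have hjle : j ≤ l.length := by omega
          have hdrop : l.drop i = c :: e :: l.drop (i + 2) := by
            rw [List.drop_eq_getElem_cons hi, List.drop_eq_getElem_cons hi1, hci, hei]
          refine ⟨hjle, if c = 0 then (PySem.List.slice (l.drop j₂) none (some e)).sum
              else (PySem.List.slice (l.drop j₂) none (some e)).foldl
                (fun acc m => acc + (insSeq PySem.Dict.empty 0 vs).getD m 0) 0,
            ?_, kN + 2, by omega, ?_⟩
          · intro g hg
            obtain ⟨g', rfl⟩ : ∃ g', g = g' + 1 := ⟨g - 1, by omega⟩
            rw [hdrop]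
            simp only [parseAux]
            rw [PySem.List.pyRange_one, Int.sub_zero,
              hfold g' (by omega) PySem.Dict.empty 0]
            rw [show PySem.List.slice (l.drop j₂) (some e) none = l.drop j from by
              rw [PySem.List.slice_some_none, List.length_drop, List.drop_drop,
                show j₂ + PySem.List.clampIdx (l.length - j₂) e = j from by omega]]
          · intro g top rest htop
            rw [show g + (kN + 2) = ((g + 1) + kN) + 1 from by omega, stepB]
            simp only [if_neg htop,
              show ((i : Nat) : Int) + 1 = ((i + 1 : Nat) : Int) from by push_cast; ring,
              PySem.List.pyGet?_natCast, hgi, hgi1]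
            rw [show ((i : Nat) : Int) + 2 = ((i + 2 : Nat) : Int) from by push_cast; ring]
            by_cases hc : 0 ≤ c
            · rw [show (⟨c, e, ([] : List Int)⟩ : PFrame)
                    = ⟨((([] : List Int).length + c.toNat : Nat) : Int), e, []⟩ from by
                  simp [Int.toNat_of_nonneg hc]]
              rw [hmach (g + 1) e [] (top :: rest)]
              rw [show (((([] : List Int).length + c.toNat : Nat)) : Int) = c from by
                simp [Int.toNat_of_nonneg hc]]
              simp only [List.nil_append]
              rw [stepB]
              rw [if_pos (show c ≤ ((vs.length : Nat) : Int) from by omega)]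
              simp only [PySem.List.slice_some_none, PySem.List.clampIdx_natCast,
                slice_to_clamp, List.length_drop,
                show min j₂ l.length = j₂ from by omega]
              rw [val_eq c vs]
              rw [show (l.length : Int) - ((l.length - j₂ -
                    PySem.List.clampIdx (l.length - j₂) e : Nat) : Int) = ((j : Nat) : Int)
                  from by omega]
            · have hc0 : c.toNat = 0 := by omega
              rw [hc0] at hN
              simp only [iterChk, Option.some.injEq] at hN
              have hvs : vs = [] := List.length_eq_zero_iff.mp (by omega)
              subst hvs
              have hkN0 : kN = 0 := by omega
              rw [hkN0, Nat.add_zero, hN, stepB]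
              rw [if_pos (show c ≤ ((([] : List Int).length : Nat) : Int) from by simp; omega)]
              simp only [PySem.List.slice_some_none, PySem.List.clampIdx_natCast,
                slice_to_clamp, List.length_drop,
                show min j₂ l.length = j₂ from by omega]
              rw [val_eq c []]
              rw [show (l.length : Int) - ((l.length - j₂ -
                    PySem.List.clampIdx (l.length - j₂) e : Nat) : Int) = ((j : Nat) : Int)
                  from by omega]
        case _ => exact absurd h (by simp)
      refine ⟨chkS, ?_⟩
      intro i n j h
      induction n generalizing i j with
      | zero =>
          simp only [iterChk, Option.some.injEq] at h
          subst h
          exact ⟨fun h => h, [], rfl, by intro g _ d a; simp [insSeq], 0, by omega,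
            by intro g ent vals rest; simp⟩
      | succ n ihn =>
          simp only [iterChk, Option.bind_eq_some_iff] at h
          obtain ⟨j₁, hc1, h2⟩ := h
          obtain ⟨hj1le, v, hA, kB, hkB, hmB⟩ := chkS i j₁ hc1
          obtain ⟨hjle, vs', hlen', hfold', kN', hk', hmach'⟩ := ihn j₁ j h2
          refine ⟨fun hil => hjle (hj1le), v :: vs', by simp [hlen'], ?_, kB + kN', by omega, ?_⟩
          · intro g hg d a
            rw [idxs_succ]
            simp only [List.foldl_cons]
            rw [hA g hg]
            dsimp only
            rw [hfold' g hg (d.insert (a + 1) v) (a + 1)]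
            rfl
          · intro g ent vals rest
            rw [show g + (kB + kN') = (g + kN') + kB from by omega]
            rw [hmB (g + kN') ⟨((vals.length + (n + 1) : Nat) : Int), ent, vals⟩ rest
              (by push_cast; omega)]
            dsimp only
            rw [show ((vals.length + (n + 1) : Nat) : Int)
                  = (((vals ++ [v]).length + n : Nat) : Int) from by
              simp only [List.length_append, List.length_singleton]; push_cast; omega]
            rw [hmach' g ent (vals ++ [v]) rest]
            simp

theorem parse_eq_alt (l : List Int) (hpre : (chk l (l.length + 1) 0).isSome = true) :
    parse l = parse_alt l := by
  obtain ⟨j, hj⟩ := Option.isSome_iff_exists.mp hpre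
  simp only [chk] at hj
  split at hj
  case _ c e hg0 hg1 =>
    rw [Option.map_eq_some_iff] at hj
    obtain ⟨j₂, hN, hjj⟩ := hj
    simp only [Nat.zero_add] at hg1 hN
    obtain ⟨h0, hc0⟩ := List.getElem?_eq_some_iff.mp hg0
    obtain ⟨h1, he1⟩ := List.getElem?_eq_some_iff.mp hg1
    obtain ⟨hj2le', vs, hlen, hfold, kN, hkN, hmach⟩ := (main_lemma l.length l).2 2 c.toNat j₂ hN
    have hj2le : j₂ ≤ l.length := hj2le' (by omega)
    have hdrop : l = c :: e :: l.drop 2 := by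
      conv_lhs => rw [← List.drop_zero (l := l)]
      rw [List.drop_eq_getElem_cons (by omega), List.drop_eq_getElem_cons (by omega)]
      simp only [Nat.zero_add]
      rw [hc0, he1]
    have hA : parse l = (PySem.List.slice (l.drop j₂) (some e) none,
        if c = 0 then (PySem.List.slice (l.drop j₂) none (some e)).sum
        else (PySem.List.slice (l.drop j₂) none (some e)).foldl
          (fun acc m => acc + (insSeq PySem.Dict.empty 0 vs).getD m 0) 0) := by
      unfold parse
      rw [show parseAux (l.length + 1) l = parseAux (l.length + 1) (c :: e :: l.drop 2) from
        by rw [← hdrop]]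
      simp only [parseAux]
      rw [PySem.List.pyRange_one, Int.sub_zero, hfold l.length le_rfl PySem.Dict.empty 0]
    have hpg1 : PySem.List.pyGet? l ((0 : Int) + 1) = l[1]? := by
      have h := PySem.List.pyGet?_natCast l 1
      simpa using h
    rw [hA]
    unfold parse_alt
    rw [show l.length + 2 = (l.length + 1) + 1 from rfl, stepB]
    simp only [PySem.List.pyGet?_zero, hpg1, hg0, hg1]
    rw [show (0 : Int) + 2 = ((2 : Nat) : Int) from by norm_num]
    by_cases hc : 0 ≤ c
    · rw [show (⟨c, e, ([] : List Int)⟩ : PFrame)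
            = ⟨((([] : List Int).length + c.toNat : Nat) : Int), e, []⟩ from by
          simp [Int.toNat_of_nonneg hc]]
      rw [show l.length + 1 = (l.length + 1 - kN) + kN from by omega,
        hmach (l.length + 1 - kN) e [] []]
      rw [show (((([] : List Int).length + c.toNat : Nat)) : Int) = c from by
        simp [Int.toNat_of_nonneg hc]]
      simp only [List.nil_append]
      obtain ⟨g', hg'⟩ : ∃ g', l.length + 1 - kN = g' + 1 := ⟨l.length - kN, by omega⟩
      rw [hg', stepB]
      rw [if_pos (show c ≤ ((vs.length : Nat) : Int) from by omega)]
      dsimp only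
      rw [PySem.List.slice_from l (show (0 : Int) ≤ ((j₂ : Nat) : Int) by positivity),
        Int.toNat_natCast]
      rw [val_eq c vs]
    · have hcn : c.toNat = 0 := by omega
      rw [hcn] at hN
      simp only [iterChk, Option.some.injEq] at hN
      have hvs : vs = [] := List.length_eq_zero_iff.mp (by omega)
      subst hvs
      rw [stepB]
      rw [if_pos (show c ≤ ((([] : List Int).length : Nat) : Int) from by simp; omega)]
      dsimp only
      rw [show ((2 : Nat) : Int) = ((j₂ : Nat) : Int) from by rw [← hN]]
      rw [PySem.List.slice_from l (show (0 : Int) ≤ ((j₂ : Nat) : Int) by positivity),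
        Int.toNat_natCast]
      rw [val_eq c []]
  case _ => exact absurd hj (by simp)

-- ===== VERDICT (by name: the statement is the Claim_ definition above) =====
theorem parse_spec : Claim_equal_parse := by
  intro l _ hpre
  exact parse_eq_alt l hpre
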